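-- pv_equiv track=rewrite | github.com/tomedic/tls2dseg | src/tls2dseg/grounded_sam2.py | resolve_class_names
-- ===== SOURCE A (Python) =====
-- from typing import List
--
-- def resolve_class_names(class_names: List[str], valid_keys: List[str]) -> List[str]:
--     """
--     Resolves a list of class names to valid keys.
--     If class_name is directly in valid_keys, keep it, else, search for the first valid_key that is a substring of
--      class_name.
--
--     Args:
--         class_names: List of predicted or raw class names.
--         valid_keys: List of valid class labels.
--
--     Returns:
--         List of resolved class names.
--     """
--     resolved = []
--     for name in class_names:
--         if name in valid_keys:
--             resolved.append(name)
--         else: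
--             match = next((key for key in valid_keys if key in name), None)
--             resolved.append(match)
--     return resolved
-- ===== SOURCE B (Python) =====
-- def _resolve_one(name, valid_keys):
--     # single pass: exact match wins outright; otherwise remember first substring key
--     first_sub = None
--     for key in valid_keys:
--         if key == name:
--             return name
--         if first_sub is None and key in name:
--             first_sub = key
--     return first_sub
--
--
-- def resolve_class_names(class_names, valid_keys):
--     cache = {}
--     out = []
--     for name in class_names:
--         if name not in cache:
--             cache[name] = _resolve_one(name, valid_keys)
--         out.append(cache[name])
--     return out
-- ===== Notes on version B (the rewrite author's own statement) =====
-- stated objective: alternative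
-- what changed: Per name, A does two scans of valid_keys (an exact-membership scan, then a fresh substring-generator scan); B does one single-pass scan that returns on an exact match and remembers the first substring match, and memoises the result per distinct name in a dict so repeated names are resolved once.
import Mathlib
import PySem

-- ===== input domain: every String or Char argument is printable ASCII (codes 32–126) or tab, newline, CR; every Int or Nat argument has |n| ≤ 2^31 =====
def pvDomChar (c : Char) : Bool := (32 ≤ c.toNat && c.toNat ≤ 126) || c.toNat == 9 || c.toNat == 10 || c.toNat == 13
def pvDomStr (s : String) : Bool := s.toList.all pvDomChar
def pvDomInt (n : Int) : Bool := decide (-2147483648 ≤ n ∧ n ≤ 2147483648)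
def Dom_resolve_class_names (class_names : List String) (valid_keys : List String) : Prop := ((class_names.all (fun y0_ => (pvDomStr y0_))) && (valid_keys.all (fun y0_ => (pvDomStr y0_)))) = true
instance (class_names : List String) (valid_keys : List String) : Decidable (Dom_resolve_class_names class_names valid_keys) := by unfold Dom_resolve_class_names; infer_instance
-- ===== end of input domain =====

-- B replaces A's two scans per name (membership test, then a fresh substring generator)
-- by one single-pass scan per distinct name, memoised in a dict for repeated names (objective: alternative).

-- ===== PORT A =====
-- next((key for key in valid_keys if key in name), None)
def firstMatchA (valid_keys : List String) (name : String) : Option String :=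
  match valid_keys with
  | [] => none
  | key :: rest => if PySem.Str.isIn key name then some key else firstMatchA rest name

def resolve_class_names (class_names : List String) (valid_keys : List String) : List (Option String) :=
  class_names.foldl
    (fun resolved name =>
      if name ∈ valid_keys then resolved ++ [some name]
      else resolved ++ [firstMatchA valid_keys name])
    []

-- ===== PORT B =====
-- single pass over valid_keys: exact match returns immediately, else first substring key is remembered
def resolveOneGo (name : String) (valid_keys : List String) (first_sub : Option String) : Option String :=
  match valid_keys with
  | [] => first_sub
  | key :: rest =>
    if key = name then some name
    else resolveOneGo name rest
      (if first_sub.isNone && PySem.Str.isIn key name then some key else first_sub)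

-- loop body of B: look the name up in the memo dict, computing and storing its resolution if absent
def stepB (valid_keys : List String)
    (st : PySem.Dict String (Option String) × List (Option String)) (name : String) :
    PySem.Dict String (Option String) × List (Option String) :=
  let cache := if st.1.contains name then st.1
               else st.1.insert name (resolveOneGo name valid_keys none)
  -- cache[name]: the key is always present at this point, so the getD default is never used
  (cache, st.2 ++ [(cache.get? name).getD none])

def resolve_class_names_alt (class_names : List String) (valid_keys : List String) : List (Option String) :=
  (class_names.foldl (stepB valid_keys) (PySem.Dict.empty, [])).2

-- ===== PRECONDITION & SPEC =====
def Spec_resolve_class_names (class_names : List String) (valid_keys : List String) (out : List (Option String)) : Prop := out = resolve_class_names_alt class_names valid_keys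
instance (class_names : List String) (valid_keys : List String) (out : List (Option String)) : Decidable (Spec_resolve_class_names class_names valid_keys out) := by unfold Spec_resolve_class_names; infer_instance

-- ===== CLAIM (what is proved, stated in full; the proofs are below) =====
def Claim_equal_resolve_class_names : Prop := ∀ (class_names : List String) (valid_keys : List String), Dom_resolve_class_names class_names valid_keys → Spec_resolve_class_names class_names valid_keys (resolve_class_names class_names valid_keys)

-- ===== LEMMAS AND PROOFS =====

-- the value A produces for one name
def aOne (valid_keys : List String) (name : String) : Option String :=
  if name ∈ valid_keys then some name else firstMatchA valid_keys name

theorem resolve_class_names_eq_map (class_names valid_keys : List String) :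
    resolve_class_names class_names valid_keys = class_names.map (aOne valid_keys) := by
  unfold resolve_class_names
  have h : ∀ (resolved : List (Option String)) (name : String),
      (if name ∈ valid_keys then resolved ++ [some name]
       else resolved ++ [firstMatchA valid_keys name]) = resolved ++ [aOne valid_keys name] := by
    intro r n; unfold aOne; split_ifs <;> rfl
  simp only [h]
  simpa using PySem.List.foldl_append_singleton_eq_map (f := aOne valid_keys)
    (l := class_names) ([] : List (Option String))

theorem resolveOneGo_spec (name : String) (valid_keys : List String) (acc : Option String) :
    resolveOneGo name valid_keys acc =
      if name ∈ valid_keys then some name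
      else (match acc with | some v => some v | none => firstMatchA valid_keys name) := by
  induction valid_keys generalizing acc with
  | nil => cases acc <;> simp [resolveOneGo, firstMatchA]
  | cons key rest ih =>
    by_cases hk : key = name
    · subst hk; simp [resolveOneGo]
    · have hne : name ≠ key := fun h => hk h.symm
      simp only [resolveOneGo, if_neg hk, ih, List.mem_cons, hne, false_or]
      cases acc with
      | some v => simp
      | none =>
        by_cases hin : PySem.Chars.isIn key.toList name.toList = true <;>
          by_cases hm : name ∈ rest <;>
            simp [hin, hm, firstMatchA]

theorem resolveOneGo_none (name : String) (valid_keys : List String) :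
    resolveOneGo name valid_keys none = aOne valid_keys name := by
  rw [resolveOneGo_spec]; unfold aOne; split_ifs <;> rfl

theorem alt_fold_spec (valid_keys : List String) (class_names : List String)
    (cache : PySem.Dict String (Option String)) (out : List (Option String))
    (hinv : ∀ n v, cache.get? n = some v → v = aOne valid_keys n) :
    (class_names.foldl (stepB valid_keys) (cache, out)).2
      = out ++ class_names.map (aOne valid_keys) := by
  induction class_names generalizing cache out with
  | nil => simp
  | cons name rest ih =>
    rw [List.foldl_cons, List.map_cons]
    by_cases hc : cache.contains name = true
    · have hsome : (cache.get? name).isSome = true := by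
        rw [← PySem.Dict.contains_eq_isSome_get?]; exact hc
      obtain ⟨v, hv⟩ := Option.isSome_iff_exists.mp hsome
      rw [hinv name v hv] at hv
      have hstep : stepB valid_keys (cache, out) name
          = (cache, out ++ [aOne valid_keys name]) := by
        simp [stepB, hc, hv]
      rw [hstep, ih _ _ hinv]; simp
    · have hstep : stepB valid_keys (cache, out) name
          = (cache.insert name (aOne valid_keys name), out ++ [aOne valid_keys name]) := by
        simp [stepB, hc, resolveOneGo_none]
      have hinv' : ∀ n v,
          (cache.insert name (aOne valid_keys name)).get? n = some v →
          v = aOne valid_keys n := by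
        intro n v h
        rw [PySem.Dict.get?_insert] at h
        split_ifs at h with hn
        · subst hn; exact (Option.some_injective _ h).symm
        · exact hinv n v h
      rw [hstep, ih _ _ hinv']; simp

-- ===== VERDICT (by name: the statement is the Claim_ definition above) =====
theorem resolve_class_names_spec : Claim_equal_resolve_class_names := by
  intro class_names valid_keys _
  unfold Spec_resolve_class_names resolve_class_names_alt
  rw [resolve_class_names_eq_map,
      alt_fold_spec valid_keys class_names PySem.Dict.empty []
        (by intro n v h; simp [PySem.Dict.get?_empty] at h)]
  simp
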